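-- pv_equiv track=rewrite | github.com/threedi/dflowfm2threedi | dflowfm2threedi/hydrolib_utils.py | features_have_geometry
-- ===== SOURCE A (Python) =====
-- from typing import List, Optional, Dict, Type, SupportsRound, Tuple
--
-- def features_have_geometry(features: Dict) -> bool | None:
--     result = {"geometry" in feature_data for feature_data in features.values()}
--     if len(result) == 0:
--         return None
--     elif len(result) == 2:
--         raise ValueError("Features dict contains mixed set of features with and without geometry")
--     else:
--         return result.pop()
-- ===== SOURCE B (Python) =====
-- def features_have_geometry(features):
--     vals = list(features.values())
--     if not vals:
--         return None
--     if all("geometry" in feature_data for feature_data in vals):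
--         return True
--     if not any("geometry" in feature_data for feature_data in vals):
--         return False
--     raise ValueError("Features dict contains mixed set of features with and without geometry")
-- ===== Notes on version B (the rewrite author's own statement) =====
-- stated objective: idiomatic
-- what changed: Replaces building a set of membership booleans and branching on its size with staged all()/any() passes: empty dict -> None, all have geometry -> True, none have geometry -> False, otherwise raise.
import Mathlib
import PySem

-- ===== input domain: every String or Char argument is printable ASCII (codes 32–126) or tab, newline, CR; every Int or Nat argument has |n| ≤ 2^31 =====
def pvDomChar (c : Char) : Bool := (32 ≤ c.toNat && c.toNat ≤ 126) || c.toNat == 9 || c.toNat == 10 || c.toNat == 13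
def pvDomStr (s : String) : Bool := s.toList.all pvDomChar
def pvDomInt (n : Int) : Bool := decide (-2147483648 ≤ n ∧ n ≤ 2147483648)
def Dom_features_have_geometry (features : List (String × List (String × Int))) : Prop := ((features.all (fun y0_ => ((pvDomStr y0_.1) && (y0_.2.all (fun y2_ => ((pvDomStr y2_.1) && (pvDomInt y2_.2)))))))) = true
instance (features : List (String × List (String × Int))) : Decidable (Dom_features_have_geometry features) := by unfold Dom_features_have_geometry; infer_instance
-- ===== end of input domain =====

-- B replaces A's set-of-booleans-and-branch-on-size with staged all()/any() passes (idiomatic; same cost).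


-- ===== PORT A =====
-- '"geometry" in feature_data' : key membership in the dict (association list)
def hasGeom (fd : List (String × Int)) : Bool := (fd.map Prod.fst).contains "geometry"

def features_have_geometry (features : List (String × List (String × Int))) : Option Bool :=
  let result : PySem.Set Bool := PySem.Set.ofList (features.map (fun p => hasGeom p.2))
  if result.length = 0 then none
  else if result.length = 2 then none   -- raise ValueError (excluded by Pre_)
  else result.head?                     -- result.pop() on a one-element set

-- ===== PORT B =====
def features_have_geometry_alt (features : List (String × List (String × Int))) : Option Bool :=
  let vals := features.map Prod.snd
  if vals = [] then none
  else if vals.all (fun fd => hasGeom fd) then some true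
  else if !(vals.any (fun fd => hasGeom fd)) then some false
  else none                             -- raise ValueError (excluded by Pre_)

-- ===== PRECONDITION & SPEC =====
-- Pre_ excludes exactly the inputs on which A (and B) raise ValueError: dicts mixing
-- features with and without a "geometry" key.
def Pre_features_have_geometry (features : List (String × List (String × Int))) : Prop :=
  (∀ p ∈ features, hasGeom p.2 = true) ∨ (∀ p ∈ features, hasGeom p.2 = false)
instance (features : List (String × List (String × Int))) : Decidable (Pre_features_have_geometry features) := by unfold Pre_features_have_geometry; infer_instance

def pvWitness_features_have_geometry : (List (String × List (String × Int))) := [("a", [("geometry", 1)]), ("b", [("geometry", 2), ("x", 0)])]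

def Spec_features_have_geometry (features : List (String × List (String × Int))) (out : Option Bool) : Prop := out = features_have_geometry_alt features
instance (features : List (String × List (String × Int))) (out : Option Bool) : Decidable (Spec_features_have_geometry features out) := by unfold Spec_features_have_geometry; infer_instance

-- ===== CLAIM (what is proved, stated in full; the proofs are below) =====
def Claim_equal_features_have_geometry : Prop := ∀ (features : List (String × List (String × Int))), Dom_features_have_geometry features → Pre_features_have_geometry features → Spec_features_have_geometry features (features_have_geometry features)

-- ===== LEMMAS AND PROOFS =====
theorem foldl_add_const (l : List Bool) (b : Bool) (h : ∀ x ∈ l, x = b) :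
    l.foldl PySem.Set.add [b] = [b] := by
  induction l with
  | nil => rfl
  | cons x xs ih =>
    have hx : x = b := h x (List.mem_cons_self)
    subst hx
    simp only [List.foldl_cons]
    have : PySem.Set.add [x] x = [x] := by
      simp [PySem.Set.add, PySem.Set.contains]
    rw [this]
    exact ih (fun y hy => h y (List.mem_cons_of_mem _ hy))

theorem ofList_const (l : List (String × List (String × Int))) (b : Bool)
    (h : ∀ p ∈ l, hasGeom p.2 = b) (hne : l ≠ []) :
    PySem.Set.ofList (l.map (fun p => hasGeom p.2)) = [b] := by
  cases l with
  | nil => exact absurd rfl hne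
  | cons p rest =>
    have hb : hasGeom p.2 = b := h p (List.mem_cons_self)
    rw [PySem.Set.ofList_eq_foldl]
    simp only [List.map_cons, List.foldl_cons, hb]
    have : PySem.Set.add ([] : List Bool) b = [b] := by
      simp [PySem.Set.add, PySem.Set.contains]
    rw [this]
    exact foldl_add_const _ b (by
      intro x hx
      rcases List.mem_map.mp hx with ⟨q, hq, rfl⟩
      exact h q (List.mem_cons_of_mem _ hq))

-- ===== VERDICT (by name: the statement is the Claim_ definition above) =====
theorem features_have_geometry_spec : Claim_equal_features_have_geometry := by
  intro features _ hpre
  unfold Spec_features_have_geometry features_have_geometry features_have_geometry_alt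
  cases features with
  | nil => rfl
  | cons p rest =>
    rcases hpre with h | h
    · rw [ofList_const (p :: rest) true h (by simp)]
      have hall : ((p :: rest).map Prod.snd).all (fun fd => hasGeom fd) = true := by
        rw [List.all_eq_true]
        intro fd hfd
        rcases List.mem_map.mp hfd with ⟨q, hq, rfl⟩
        exact h q hq
      simp only [hall]
      simp
    · rw [ofList_const (p :: rest) false h (by simp)]
      have hany : ((p :: rest).map Prod.snd).any (fun fd => hasGeom fd) = false := by
        rw [List.any_eq_false]
        intro fd hfd
        rcases List.mem_map.mp hfd with ⟨q, hq, rfl⟩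
        simpa using h q hq
      have hall : ((p :: rest).map Prod.snd).all (fun fd => hasGeom fd) = false := by
        simp only [List.map_cons, List.all_cons, h p List.mem_cons_self, Bool.false_and]
      simp only [hall, hany]
      simp
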